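-- pv_equiv track=rewrite | github.com/bhatnagararchit/adventOfCode2023 | 02/main.py | get_game_possible_min_cubes
-- ===== SOURCE A (Python) =====
-- CUBE_COLOR_INDICES = {"red": 0, "green": 1, "blue": 2}
--
-- def get_game_possible_min_cubes(game_draws: tuple[tuple[int]]) -> tuple[int]:
--     """
--     Returns the minimum number of cubes of each color required for all draws of a game -- given as
--     game_draws -- to be possible.
--
--     game_draws is expected in the same format that read_game_data outputs -- that is, the nth draw
--     is stored in game_draws[n], with number of cubes of color key_color drawn in the nth draw stored
--     in game_draws[n][CUBE_COLOR_INDICES[key_color]]. min_cubes -- which is returned -- stores the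
--     minimum required number of cubes of color key_color in min_cubes[CUBE_COLOR_INDICES[key_color]].
--
--     The minimum number of cubes required for all draws to be possible is the maximum number of cubes
--     observed for each color in the draws. This function calculates the maximum number of cubes, for
--     each color separately, observed in game_draws.
--     """
--     min_cubes = [0 for _ in CUBE_COLOR_INDICES]
--     for game_draw in game_draws:
--         # Given assumption of same structure in game_draws[n] and min_cubes,
--         # no need to call CUBE_COLOR_INDICES
--         for ind, (game_draw_color, min_cubes_color) in enumerate(
--             zip(game_draw, min_cubes)
--         ):
--             if min_cubes_color < game_draw_color:
--                 min_cubes[ind] = game_draw_color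
--     return min_cubes
-- ===== SOURCE B (Python) =====
-- CUBE_COLOR_INDICES = {"red": 0, "green": 1, "blue": 2}
--
-- def get_game_possible_min_cubes(game_draws):
--     # Bucket each color's observations into its own column list (seeded with 0
--     # so an absent/short column yields 0), then SORT each column and take its
--     # last (largest) element -- sort-then-take-last instead of any running max.
--     cols = [[0] for _ in CUBE_COLOR_INDICES]
--     for row in game_draws:
--         for i, v in enumerate(row[:3]):
--             cols[i].append(v)
--     return [sorted(c)[-1] for c in cols]
-- ===== Notes on version B (the rewrite author's own statement) =====
-- stated objective: alternative
-- what changed: Instead of threading a running-max accumulator through the rows, B buckets each color's observations into a per-color column list (seeded with 0), sorts each column and takes its last element.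
import Mathlib
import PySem

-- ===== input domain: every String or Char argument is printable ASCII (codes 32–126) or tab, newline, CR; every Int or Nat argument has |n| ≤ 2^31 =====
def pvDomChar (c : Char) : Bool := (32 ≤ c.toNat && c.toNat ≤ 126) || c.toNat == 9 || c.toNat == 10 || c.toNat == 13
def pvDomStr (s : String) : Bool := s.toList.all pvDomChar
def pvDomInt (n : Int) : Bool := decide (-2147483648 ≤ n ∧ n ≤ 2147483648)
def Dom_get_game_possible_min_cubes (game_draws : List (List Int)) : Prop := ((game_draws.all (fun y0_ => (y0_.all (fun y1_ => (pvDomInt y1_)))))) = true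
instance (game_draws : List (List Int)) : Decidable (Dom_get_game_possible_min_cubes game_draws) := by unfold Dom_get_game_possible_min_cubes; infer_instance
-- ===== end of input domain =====

-- B buckets each color's values into a column list (seeded with 0), sorts each column and
-- takes its last element, instead of A's row-major running-max accumulator; objective: alternative.


-- ===== PORT A =====
-- inner loop of A: for ind, (dv, mv) in enumerate(zip(game_draw, min_cubes)): if mv < dv: min_cubes[ind] = dv
-- (Python's zip iterates min_cubes lazily while it is mutated, but each index is read
-- before it may be written, so zipping the entry value equals the lazy read; the fold
-- below carries the updated list as the accumulator and reads the pair from the zip.)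
def pvStepA (min_cubes : List Int) (game_draw : List Int) : List Int :=
  ((game_draw.zip min_cubes).zipIdx).foldl
    (fun acc p =>
      let dv := p.1.1
      let mv := p.1.2
      let ind := p.2
      if mv < dv then acc.set ind dv else acc) min_cubes

def get_game_possible_min_cubes (game_draws : List (List Int)) : List Int :=
  -- min_cubes = [0 for _ in CUBE_COLOR_INDICES]  (three colors)
  game_draws.foldl pvStepA [0, 0, 0]

-- ===== PORT B =====
-- Source B inner loop: for i, v in enumerate(row[:3]): cols[i].append(v)
def pvStepB (cols : List (List Int)) (row : List Int) : List (List Int) :=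
  ((PySem.List.slice row none (some 3) : List Int).zipIdx).foldl
    (fun cols p => cols.modify p.2 (· ++ [p.1])) cols

-- Source B: cols = [[0],[0],[0]]; bucket every row; return [sorted(c)[-1] for c in cols]
-- (sorted(c)[-1] is ported as getLastD 0 of PySem's sorted; every c holds the seed 0,
-- so the list is never empty and the default is never used)
def get_game_possible_min_cubes_alt (game_draws : List (List Int)) : List Int :=
  let cols := game_draws.foldl pvStepB [[0], [0], [0]]
  cols.map (fun c => (PySem.List.sorted c (fun x => x) false).getLastD 0)

-- ===== PRECONDITION & SPEC =====
def Spec_get_game_possible_min_cubes (game_draws : List (List Int)) (out : List Int) : Prop := out = get_game_possible_min_cubes_alt game_draws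
instance (game_draws : List (List Int)) (out : List Int) : Decidable (Spec_get_game_possible_min_cubes game_draws out) := by unfold Spec_get_game_possible_min_cubes; infer_instance

-- ===== CLAIM (what is proved, stated in full; the proofs are below) =====
def Claim_equal_get_game_possible_min_cubes : Prop := ∀ (game_draws : List (List Int)), Dom_get_game_possible_min_cubes game_draws → Spec_get_game_possible_min_cubes game_draws (get_game_possible_min_cubes game_draws)

-- ===== LEMMAS AND PROOFS =====

-- A's inner loop on a 3-element accumulator computed by cases on the draw's shape
theorem pvStepA_eq (a b c : Int) (d : List Int) :
    pvStepA [a, b, c] d =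
      match d with
      | [] => [a, b, c]
      | [x] => [max a x, b, c]
      | [x, y] => [max a x, max b y, c]
      | x :: y :: z :: _ => [max a x, max b y, max c z] := by
  rcases d with _ | ⟨x, _ | ⟨y, _ | ⟨z, rest⟩⟩⟩ <;>
    simp [pvStepA, List.zipIdx, List.set] <;>
    split_ifs <;> simp_all <;> omega

-- B's inner loop on a 3-element bucket list computed by cases on the row's shape
theorem pvStepB_eq (la lb lc : List Int) (d : List Int) :
    pvStepB [la, lb, lc] d =
      match d with
      | [] => [la, lb, lc]
      | [x] => [la ++ [x], lb, lc]
      | [x, y] => [la ++ [x], lb ++ [y], lc]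
      | x :: y :: z :: _ => [la ++ [x], lb ++ [y], lc ++ [z]] := by
  rcases d with _ | ⟨x, _ | ⟨y, _ | ⟨z, rest⟩⟩⟩ <;>
    simp [pvStepB, PySem.List.slice, List.zipIdx, List.modify]

-- running A's fold from [a,b,c] equals the three column max-folds
theorem pvA_fold (gs : List (List Int)) : ∀ a b c : Int,
    gs.foldl pvStepA [a, b, c] =
      [(gs.filterMap (fun d => d[0]?)).foldl max a,
       (gs.filterMap (fun d => d[1]?)).foldl max b,
       (gs.filterMap (fun d => d[2]?)).foldl max c] := by
  induction gs with
  | nil => intro a b c; rfl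
  | cons d gs ih =>
    intro a b c
    rcases d with _ | ⟨x, _ | ⟨y, _ | ⟨z, rest⟩⟩⟩ <;>
      simp [List.foldl_cons, pvStepA_eq, ih]

-- running B's bucket fold appends each color's column to its seed
theorem pvB_fold (gs : List (List Int)) : ∀ la lb lc : List Int,
    gs.foldl pvStepB [la, lb, lc] =
      [la ++ gs.filterMap (fun d => d[0]?),
       lb ++ gs.filterMap (fun d => d[1]?),
       lc ++ gs.filterMap (fun d => d[2]?)] := by
  induction gs with
  | nil => intro la lb lc; simp
  | cons d gs ih =>
    intro la lb lc
    rcases d with _ | ⟨x, _ | ⟨y, _ | ⟨z, rest⟩⟩⟩ <;>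
      simp [List.foldl_cons, pvStepB_eq, ih]

-- foldl max a t is an element of a :: t …
theorem pv_foldl_max_mem (t : List Int) : ∀ a : Int, t.foldl max a ∈ a :: t := by
  induction t with
  | nil => intro a; simp
  | cons x t ih =>
    intro a
    rw [List.foldl_cons]
    rcases List.mem_cons.mp (ih (max a x)) with h | h
    · rw [h]
      rcases max_choice a x with hm | hm <;> simp [hm]
    · exact List.mem_cons_of_mem _ (List.mem_cons_of_mem _ h)

-- … and an upper bound of a :: t
theorem pv_foldl_max_ub (t : List Int) : ∀ a : Int, ∀ y ∈ a :: t, y ≤ t.foldl max a := by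
  induction t with
  | nil => intro a y hy; simp_all
  | cons x t ih =>
    intro a y hy
    rw [List.foldl_cons]
    rcases List.mem_cons.mp hy with rfl | hy
    · exact le_trans (le_max_left y x) (ih (max y x) _ (List.mem_cons_self))
    rcases List.mem_cons.mp hy with rfl | hy
    · exact le_trans (le_max_right a y) (ih (max a y) _ (List.mem_cons_self))
    · exact ih (max a x) y (List.mem_cons_of_mem _ hy)

-- the last element of a nonempty list is a member
theorem pv_getLastD_mem (s : List Int) (hs : s ≠ []) : s.getLastD 0 ∈ s := by
  induction s with
  | nil => exact absurd rfl hs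
  | cons x t ih =>
    cases t with
    | nil => simp
    | cons y u => simpa using Or.inr (ih (by simp))

-- in a ≤-sorted list, every element is at most the last one
theorem pv_sorted_le_last (s : List Int) (hp : s.Pairwise (· ≤ ·)) :
    ∀ y ∈ s, y ≤ s.getLastD 0 := by
  induction s with
  | nil => intro y hy; simp_all
  | cons x t ih =>
    intro y hy
    rcases List.pairwise_cons.mp hp with ⟨hx, ht⟩
    cases t with
    | nil => simp_all
    | cons z u =>
      rcases List.mem_cons.mp hy with rfl | hy
      · exact le_trans (hx z (by simp)) (ih ht z (by simp))
      · exact ih ht y hy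

-- sorted(0 :: col)[-1] = foldl max 0 col
theorem pv_sorted_last_eq (col : List Int) :
    (PySem.List.sorted (0 :: col) (fun x => x) false).getLastD 0 = col.foldl max 0 := by
  have hperm : (PySem.List.sorted (0 :: col) (fun x => x) false).Perm (0 :: col) :=
    PySem.List.sorted_perm ..
  have hpw : (PySem.List.sorted (0 :: col) (fun x => x) false).Pairwise (fun a b => a ≤ b) :=
    PySem.List.sorted_pairwise ..
  have hne : PySem.List.sorted (0 :: col) (fun x => x) false ≠ [] := by
    intro h
    have := hperm.length_eq
    simp [h] at this
  apply le_antisymm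
  · exact pv_foldl_max_ub col 0 _ (hperm.mem_iff.mp (pv_getLastD_mem _ hne))
  · exact pv_sorted_le_last _ hpw _ (hperm.mem_iff.mpr (pv_foldl_max_mem col 0))

-- ===== VERDICT (by name: the statement is the Claim_ definition above) =====
theorem get_game_possible_min_cubes_spec : Claim_equal_get_game_possible_min_cubes := by
  intro gs _
  unfold Spec_get_game_possible_min_cubes get_game_possible_min_cubes get_game_possible_min_cubes_alt
  rw [pvA_fold, pvB_fold]
  simp only [List.map_cons, List.map_nil, List.singleton_append]
  rw [pv_sorted_last_eq, pv_sorted_last_eq, pv_sorted_last_eq]
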